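-- pv_equiv track=rewrite | github.com/amrhym/ppg-glucose-estimation | model_analysis_no_torch.py | calculate_cnn_parameters
-- ===== SOURCE A (Python) =====
-- from typing import Dict, List, Tuple
--
-- def calculate_cnn_parameters(kernels: List[int], channels: List[int]) -> int:
--     """Calculate parameters for a CNN branch."""
--     params = 0
--     in_channels = 1
--
--     for kernel_size, out_channels in zip(kernels, channels):
--         # Conv1d parameters: (in_channels * kernel_size + 1) * out_channels
--         conv_params = (in_channels * kernel_size + 1) * out_channels
--
--         # BatchNorm parameters: 2 * out_channels (weight and bias)
--         bn_params = 2 * out_channels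
--
--         params += conv_params + bn_params
--         in_channels = out_channels
--
--     return params
-- ===== SOURCE B (Python) =====
-- from typing import List
--
-- def calculate_cnn_parameters(kernels: List[int], channels: List[int]) -> int:
--     """Calculate parameters for a CNN branch."""
--     n = min(len(kernels), len(channels))
--     outs = channels[:n]
--     # Every per-channel scalar (conv bias + two BatchNorm affine params) contributes 3.
--     affine = 3 * sum(outs)
--     # Conv weight tensors: in*k*out, where each layer's "in" is the previous "out"
--     # (1 for the first layer) -- read off adjacent pairs of outs, no threaded state.
--     weights = kernels[0] * outs[0] if n else 0
--     weights += sum(a * k * b for a, k, b in zip(outs, kernels[1:], outs[1:]))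
--     return affine + weights
-- ===== Notes on version B (the rewrite author's own statement) =====
-- stated objective: alternative
-- what changed: Regroups the count algebraically: one pass sums 3 per output channel (conv bias + both BatchNorm params) and a separate pass sums the conv weight products read off adjacent pairs of the truncated channel list, eliminating A's threaded in_channels accumulator and per-layer conv/bn breakdown.
import Mathlib
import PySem

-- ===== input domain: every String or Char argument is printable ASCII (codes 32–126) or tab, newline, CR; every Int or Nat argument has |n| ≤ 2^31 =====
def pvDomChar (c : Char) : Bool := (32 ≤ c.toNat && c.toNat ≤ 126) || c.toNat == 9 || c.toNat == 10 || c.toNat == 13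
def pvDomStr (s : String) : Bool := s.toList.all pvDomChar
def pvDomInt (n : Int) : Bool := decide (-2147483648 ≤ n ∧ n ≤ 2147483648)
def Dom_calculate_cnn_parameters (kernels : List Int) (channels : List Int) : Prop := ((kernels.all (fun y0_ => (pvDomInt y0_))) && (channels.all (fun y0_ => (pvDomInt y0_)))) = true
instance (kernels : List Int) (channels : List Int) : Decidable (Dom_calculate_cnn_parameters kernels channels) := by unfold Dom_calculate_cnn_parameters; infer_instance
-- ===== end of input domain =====

-- B regroups the count algebraically: all per-channel scalars (conv bias + the two
-- BatchNorm params) become one 3*sum pass, and the conv weight tensors are summed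
-- from adjacent pairs of the output-channel list, with no threaded in_channels state.

-- ===== PORT A =====
-- loop over zip(kernels, channels) carrying (params, in_channels)
def calculate_cnn_parameters (kernels : List Int) (channels : List Int) : Int :=
  ((kernels.zip channels).foldl
    (fun (s : Int × Int) kc =>
      (s.1 + ((s.2 * kc.1 + 1) * kc.2 + 2 * kc.2), kc.2))
    (0, 1)).1

-- ===== PORT B =====
-- n = min(len(kernels), len(channels)); outs = channels[:n];
-- affine = 3*sum(outs); weights = kernels[0]*outs[0] (if n) + Σ a*k*b over
-- zip(outs, kernels[1:], outs[1:]).  (kernels[0]/outs[0] are guarded by n ≠ 0,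
-- so headD 0 is exact here.)
def calculate_cnn_parameters_alt (kernels : List Int) (channels : List Int) : Int :=
  let n := min kernels.length channels.length
  let outs := channels.take n
  let affine := 3 * outs.sum
  let weights := (if n ≠ 0 then kernels.headD 0 * outs.headD 0 else 0)
    + (List.zipWith3 (fun a k b => a * k * b) outs (kernels.drop 1) (outs.drop 1)).sum
  affine + weights

-- ===== PRECONDITION & SPEC =====
def Spec_calculate_cnn_parameters (kernels : List Int) (channels : List Int) (out : Int) : Prop := out = calculate_cnn_parameters_alt kernels channels
instance (kernels : List Int) (channels : List Int) (out : Int) : Decidable (Spec_calculate_cnn_parameters kernels channels out) := by unfold Spec_calculate_cnn_parameters; infer_instance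

-- ===== CLAIM (what is proved, stated in full; the proofs are below) =====
def Claim_equal_calculate_cnn_parameters : Prop := ∀ (kernels : List Int) (channels : List Int), Dom_calculate_cnn_parameters kernels channels → Spec_calculate_cnn_parameters kernels channels (calculate_cnn_parameters kernels channels)

-- ===== LEMMAS AND PROOFS =====

-- Layer recursion both programs compute: F c ks os = Σ (c_i*k_i+1)*o_i + 2*o_i.
def cnnF (c : Int) : List Int → List Int → Int
  | k :: ks, o :: os => (c * k + 1) * o + 2 * o + cnnF o ks os
  | _, _ => 0

-- A's fold starting at (p, c) yields p + cnnF c ks os.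
lemma cnn_fold_eq (kernels : List Int) :
    ∀ (channels : List Int) (c p : Int),
      ((kernels.zip channels).foldl
        (fun (s : Int × Int) kc =>
          (s.1 + ((s.2 * kc.1 + 1) * kc.2 + 2 * kc.2), kc.2))
        (p, c)).1
      = p + cnnF c kernels channels := by
  induction kernels with
  | nil => intro channels c p; simp [cnnF]
  | cons k ks ih =>
    intro channels c p
    cases channels with
    | nil => simp [cnnF]
    | cons o rest =>
      simp only [List.zip_cons_cons, List.foldl_cons, ih, cnnF]
      ring

-- B's regrouped form equals cnnF with the head input channel generalized to c.
lemma cnn_alt_eq (kernels : List Int) :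
    ∀ (channels : List Int) (c : Int),
      cnnF c kernels channels
      = 3 * (channels.take (min kernels.length channels.length)).sum
        + ((if min kernels.length channels.length ≠ 0
              then c * kernels.headD 0 * (channels.take (min kernels.length channels.length)).headD 0
              else 0)
           + (List.zipWith3 (fun a k b => a * k * b)
               (channels.take (min kernels.length channels.length))
               (kernels.drop 1)
               ((channels.take (min kernels.length channels.length)).drop 1)).sum) := by
  induction kernels with
  | nil => intro channels c; simp [cnnF]
  | cons k ks ih =>
    intro channels c
    cases channels with
    | nil => simp [cnnF]
    | cons o os =>
      cases ks with
      | nil => simp [cnnF]; ring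
      | cons k' ks' =>
        cases os with
        | nil => simp [cnnF, List.zipWith3]; ring
        | cons o' os' =>
          have h := ih (o' :: os') o
          simp only [cnnF] at h ⊢
          simp only [List.length_cons, Nat.succ_min_succ, List.take_succ_cons,
            List.headD_cons, List.drop_succ_cons, List.drop_zero, List.sum_cons] at h ⊢
          rw [h]
          cases hm : min ks'.length os'.length <;>
            simp [List.zipWith3] <;> ring

-- ===== VERDICT (by name: the statement is the Claim_ definition above) =====
theorem calculate_cnn_parameters_spec : Claim_equal_calculate_cnn_parameters := by
  intro kernels channels _
  show _ = _
  unfold calculate_cnn_parameters calculate_cnn_parameters_alt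
  rw [cnn_fold_eq, cnn_alt_eq]
  simp
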